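-- pv_equiv track=rewrite | github.com/mateusparanhos/Conversor-n-merico- | conversao.py | converte_lista_em_numero
-- ===== SOURCE A (Python) =====
-- def converte_lista_em_numero(lista_convertida):
-- 	unidade_de_medida_numero = [1000, 1000000, 1000000000]
--
-- 	auxiliar = 0
-- 	numero_convertido = 0
-- 	# Cria-se uma lista auxiliar pois as operações são realizadas com base na deleção de números e por isso precisa-se de duas listas iguais: uma pra percorrer e outra para operar
-- 	lista_auxiliar = lista_convertida.copy()
--
-- 	# Percorre a lista com os valores em formato de numero (Exemplo: [1000, 900, 90, 8])
-- 	for item in lista_convertida: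
-- 		if item in unidade_de_medida_numero:
--
-- 			# Caso o primeiro item já seja uma unidade de medida, acresce-se o número 1 no início da lista
-- 			if lista_auxiliar.index(item) == 0:
-- 				lista_auxiliar.insert(0, 1)
--
-- 			#Ao achar um index cujo valor é unidade de medida, soma-se todos os valores de 0 até esse valor (ou seja até index-1) e multiplica-se pela unidade de medida correspondente
-- 			auxiliar=sum(lista_auxiliar[:lista_auxiliar.index(item)])*item
--
-- 			# Esse valor é acrescido ao valor do numero_convertido que será exibido no final
-- 			numero_convertido+=auxiliar
--
-- 			# Deleta-se essa sublista da operação anterior para sempre que a operação seja feita não sejam utilizados números que já foram operados antes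
-- 			del lista_auxiliar[:lista_auxiliar.index(item)+1]
--
-- 	# Se ao percorrer a lista no final ainda existam itens sem deletar significa que o último elemento da lista não foi uma unidade de medida, então basta acrescer à variável de numero_convertido o resto da soma da lista
-- 	if len(lista_convertida) > 0:
-- 		numero_convertido += sum(lista_auxiliar)
--
-- 	return numero_convertido
-- ===== SOURCE B (Python) =====
-- def converte_lista_em_numero(lista_convertida):
-- 	# Single pass: accumulate the current segment's sum; on a unit marker add
-- 	# (segment sum, or 1 if the segment is empty)*unit and reset the segment.
-- 	unidades = (1000, 1000000, 1000000000)
-- 	total = 0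
-- 	segmento = 0
-- 	vazio = True
-- 	for item in lista_convertida:
-- 		if item in unidades:
-- 			total += (1 if vazio else segmento) * item
-- 			segmento = 0
-- 			vazio = True
-- 		else:
-- 			segmento += item
-- 			vazio = False
-- 	return total + segmento
-- ===== Notes on version B (the rewrite author's own statement) =====
-- stated objective: simpler
-- what changed: Replaces A's auxiliary-list bookkeeping (copy, repeated .index, prefix sum and slice deletion per unit marker) with a single pass that accumulates the current segment sum and, on a unit marker, adds (segment sum, or 1 for an empty segment) times the unit and resets.
import Mathlib
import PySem

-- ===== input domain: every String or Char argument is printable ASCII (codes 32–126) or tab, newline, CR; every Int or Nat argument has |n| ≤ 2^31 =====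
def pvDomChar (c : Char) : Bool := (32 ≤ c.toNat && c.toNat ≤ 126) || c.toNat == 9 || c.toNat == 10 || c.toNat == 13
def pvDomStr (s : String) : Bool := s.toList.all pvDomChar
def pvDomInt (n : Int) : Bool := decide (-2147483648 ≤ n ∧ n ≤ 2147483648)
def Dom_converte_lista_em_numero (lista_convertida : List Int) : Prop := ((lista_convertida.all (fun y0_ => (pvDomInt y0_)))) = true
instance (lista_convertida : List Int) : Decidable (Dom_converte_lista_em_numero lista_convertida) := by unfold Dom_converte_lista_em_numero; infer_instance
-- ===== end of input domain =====

-- B replaces A's auxiliary-list copy/index/sum/delete bookkeeping by a single pass that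
-- accumulates the current segment sum and multiplies it by unit markers (objective: simpler).


-- ===== PORT A =====
-- unidade_de_medida_numero = [1000, 1000000, 1000000000]
def pvUnits : List Int := [1000, 1000000, 1000000000]

-- one iteration of A's for-loop; state = (lista_auxiliar, numero_convertido)
def pvStepA (st : List Int × Int) (item : Int) : List Int × Int :=
  if item ∈ pvUnits then
    -- Python `.index` always succeeds here (item was just found in the list);
    -- the `none` branches are unreachable and keep the state unchanged.
    match PySem.List.index? st.1 item with
    | none => st
    | some i =>
      let aux := if i = 0 then PySem.List.insert st.1 0 1 else st.1
      match PySem.List.index? aux item with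
      | none => (aux, st.2)
      | some j =>
        let auxiliar := (PySem.List.slice aux none (some (j : Int))).sum * item
        (PySem.List.slice aux (some ((j : Int) + 1)) none, st.2 + auxiliar)
  else st

def converte_lista_em_numero (lista_convertida : List Int) : Int :=
  let (aux, numero) := lista_convertida.foldl pvStepA (lista_convertida, 0)
  if PySem.List.len lista_convertida > 0 then numero + aux.sum else numero

-- ===== PORT B =====
-- one iteration of B's for-loop; state = (total, segmento, vazio)
def pvStepB (st : Int × Int × Bool) (item : Int) : Int × Int × Bool :=
  if item ∈ pvUnits then
    (st.1 + (if st.2.2 then 1 else st.2.1) * item, 0, true)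
  else (st.1, st.2.1 + item, false)

def converte_lista_em_numero_alt (lista_convertida : List Int) : Int :=
  let (total, segmento, _) := lista_convertida.foldl pvStepB (0, 0, true)
  total + segmento

-- ===== PRECONDITION & SPEC =====
def Spec_converte_lista_em_numero (lista_convertida : List Int) (out : Int) : Prop := out = converte_lista_em_numero_alt lista_convertida
instance (lista_convertida : List Int) (out : Int) : Decidable (Spec_converte_lista_em_numero lista_convertida out) := by unfold Spec_converte_lista_em_numero; infer_instance

-- ===== CLAIM (what is proved, stated in full; the proofs are below) =====
def Claim_equal_converte_lista_em_numero : Prop := ∀ (lista_convertida : List Int), Dom_converte_lista_em_numero lista_convertida → Spec_converte_lista_em_numero lista_convertida (converte_lista_em_numero lista_convertida)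

-- ===== LEMMAS AND PROOFS =====

-- A's auxiliary list is always (current segment) ++ (remaining items); the segment
-- contains no unit markers, so both loops are related by this invariant.
theorem pv_stepA_unit (seg l : List Int) (x num : Int) (hx : x ∈ pvUnits)
    (hxseg : x ∉ seg) :
    pvStepA (seg ++ x :: l, num) x
      = (l, num + (if seg.isEmpty then 1 else seg.sum) * x) := by
  have hidx : PySem.List.index? (seg ++ x :: l) x = some seg.length := by
    have h := PySem.List.index?_append_of_mem (v := x) (l := seg ++ [x]) (t := l) (by simp)
    rw [List.append_assoc, List.singleton_append] at h
    rw [h]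
    exact PySem.List.index?_append_singleton_self seg x hxseg
  cases seg with
  | nil =>
    have h1x : (1 : Int) ≠ x := by
      intro h; rw [← h] at hx; simp [pvUnits] at hx
    have hi1 : PySem.List.index? ((1 : Int) :: x :: l) x = some 1 := by
      rw [PySem.List.index?_cons_of_ne _ h1x, PySem.List.index?_cons_self]; rfl
    simp only [List.nil_append, List.length_nil] at hidx
    simp only [pvStepA, if_pos hx, List.nil_append, hidx, PySem.List.insert_zero,
      reduceIte, hi1]
    rw [PySem.List.slice_to _ (by norm_num), PySem.List.slice_from _ (by norm_num)]
    norm_num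
    rfl
  | cons s0 srest =>
    have hlen : (s0 :: srest).length ≠ 0 := by simp
    simp only [pvStepA, if_pos hx, hidx, if_neg hlen]
    rw [PySem.List.slice_to_natCast]
    rw [show (((s0 :: srest).length : Int) + 1) = (((s0 :: srest).length + 1 : Nat) : Int)
      by push_cast; ring]
    rw [PySem.List.slice_from_natCast]
    rw [List.take_left' (l₁ := s0 :: srest) rfl]
    rw [show (s0 :: srest) ++ x :: l = ((s0 :: srest) ++ [x]) ++ l by simp,
      List.drop_left' (by simp)]
    simp

theorem pv_main (l seg : List Int) (hseg : ∀ x ∈ seg, x ∉ pvUnits) (num : Int) :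
    (let (aux, n) := l.foldl pvStepA (seg ++ l, num); n + aux.sum)
    = (let (t, s, _) := l.foldl pvStepB (num, seg.sum, seg.isEmpty); t + s) := by
  induction l generalizing seg num with
  | nil => simp
  | cons x l ih =>
    simp only [List.foldl_cons]
    by_cases hx : x ∈ pvUnits
    · have hxseg : x ∉ seg := fun h => hseg x h hx
      rw [pv_stepA_unit seg l x num hx hxseg]
      have := ih ([] : List Int) (by simp) (num + (if seg.isEmpty then 1 else seg.sum) * x)
      simpa [pvStepB, hx] using this
    · have hstep : pvStepA (seg ++ x :: l, num) x = ((seg ++ [x]) ++ l, num) := by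
        simp [pvStepA, hx]
      rw [hstep]
      have := ih (seg ++ [x]) (by
        intro y hy; rcases List.mem_append.mp hy with h | h
        · exact hseg y h
        · simp at h; subst h; exact hx) num
      rw [show (seg ++ [x]).isEmpty = false from by simp,
          show (seg ++ [x]).sum = seg.sum + x from by simp] at this
      simpa [pvStepB, hx] using this

-- ===== VERDICT (by name: the statement is the Claim_ definition above) =====
theorem converte_lista_em_numero_spec : Claim_equal_converte_lista_em_numero := by
  intro l _
  unfold Spec_converte_lista_em_numero converte_lista_em_numero converte_lista_em_numero_alt
  have := pv_main l [] (by simp) 0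
  cases l with
  | nil => rfl
  | cons x l =>
    simp only [List.nil_append, List.sum_nil, List.isEmpty_nil] at this
    simp only [PySem.List.len_eq, List.length_cons]
    rw [if_pos (by push_cast; omega)]
    exact this
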